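-- pv_equiv track=rewrite | github.com/realjules/realtime-assistant | realtime/vendor_tools.py | suggest_product_details
-- ===== SOURCE A (Python) =====
-- from typing import Dict, List, Any, Optional
--
-- def suggest_product_details(partial_name: str) -> Dict[str, Any]:
--     """
--     Suggest product details based on partial name to help users
--     """
--     suggestions = {}
--
--     name_lower = partial_name.lower()
--
--     # Category suggestions
--     if any(word in name_lower for word in ["phone", "smartphone", "mobile"]):
--         suggestions["category"] = "Electronics"
--         suggestions["warranty"] = "12 months"
--         suggestions["example_description"] = "Latest smartphone with advanced features"
--     elif any(word in name_lower for word in ["laptop", "computer", "pc"]):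
--         suggestions["category"] = "Computing"
--         suggestions["warranty"] = "24 months"
--         suggestions["example_description"] = "High-performance laptop for work and entertainment"
--     elif any(word in name_lower for word in ["headphone", "earphone", "speaker"]):
--         suggestions["category"] = "Audio"
--         suggestions["warranty"] = "6 months"
--         suggestions["example_description"] = "Premium audio device with superior sound quality"
--     elif any(word in name_lower for word in ["cable", "charger", "adapter"]):
--         suggestions["category"] = "Accessories"
--         suggestions["warranty"] = "3 months"
--         suggestions["example_description"] = "Quality accessory for your devices"
--     else:
--         suggestions["category"] = "Electronics"
--         suggestions["warranty"] = "6 months"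
--         suggestions["example_description"] = "Quality product with reliable performance"
--
--     # Brand suggestions
--     if "iphone" in name_lower or "macbook" in name_lower or "ipad" in name_lower:
--         suggestions["brand"] = "Apple"
--     elif "samsung" in name_lower or "galaxy" in name_lower:
--         suggestions["brand"] = "Samsung"
--     elif "dell" in name_lower:
--         suggestions["brand"] = "Dell"
--     elif "hp" in name_lower:
--         suggestions["brand"] = "HP"
--     elif "sony" in name_lower:
--         suggestions["brand"] = "Sony"
--     else:
--         suggestions["brand"] = "Generic"
--
--     return suggestions
-- ===== SOURCE B (Python) =====
-- def suggest_product_details(partial_name: str):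
--     """Suggest product details based on partial name to help users."""
--     name_lower = partial_name.lower()
--
--     # Flat keyword -> priority maps: instead of an ordered first-match ladder,
--     # scan ALL keywords, collect the priorities of those that occur in the
--     # name, and take the minimum priority (the default priority if none match).
--     category_priority = {
--         "phone": 0, "smartphone": 0, "mobile": 0,
--         "laptop": 1, "computer": 1, "pc": 1,
--         "headphone": 2, "earphone": 2, "speaker": 2,
--         "cable": 3, "charger": 3, "adapter": 3,
--     }
--     category_bundles = [
--         ("Electronics", "12 months", "Latest smartphone with advanced features"),
--         ("Computing", "24 months", "High-performance laptop for work and entertainment"),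
--         ("Audio", "6 months", "Premium audio device with superior sound quality"),
--         ("Accessories", "3 months", "Quality accessory for your devices"),
--         ("Electronics", "6 months", "Quality product with reliable performance"),
--     ]
--     cat_idx = min((p for k, p in category_priority.items() if k in name_lower),
--                   default=len(category_bundles) - 1)
--     category, warranty, description = category_bundles[cat_idx]
--
--     brand_priority = {
--         "iphone": 0, "macbook": 0, "ipad": 0,
--         "samsung": 1, "galaxy": 1,
--         "dell": 2, "hp": 3, "sony": 4,
--     }
--     brands = ["Apple", "Samsung", "Dell", "HP", "Sony", "Generic"]
--     brand = brands[min((p for k, p in brand_priority.items() if k in name_lower),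
--                        default=len(brands) - 1)]
--
--     return {
--         "category": category,
--         "warranty": warranty,
--         "example_description": description,
--         "brand": brand,
--     }
-- ===== Notes on version B (the rewrite author's own statement) =====
-- stated objective: alternative
-- what changed: Replaces the ordered if/elif first-match ladders with flat keyword-to-priority maps: B scans all keywords, takes the minimum priority among those occurring in the lowered name (default priority if none), and indexes a bundle/brand table with it.
import Mathlib
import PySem

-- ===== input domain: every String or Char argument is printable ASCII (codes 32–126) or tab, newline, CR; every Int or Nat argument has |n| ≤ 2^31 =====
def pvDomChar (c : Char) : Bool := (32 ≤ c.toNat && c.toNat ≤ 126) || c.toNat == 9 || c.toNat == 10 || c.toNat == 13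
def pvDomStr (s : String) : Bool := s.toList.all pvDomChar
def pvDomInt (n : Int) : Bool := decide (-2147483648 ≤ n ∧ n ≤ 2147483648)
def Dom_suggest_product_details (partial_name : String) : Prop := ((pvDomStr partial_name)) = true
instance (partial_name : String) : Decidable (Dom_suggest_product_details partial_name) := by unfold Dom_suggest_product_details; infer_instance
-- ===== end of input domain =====

-- B replaces the ordered if/elif first-match ladders by flat keyword→priority maps:
-- it takes the minimum priority among all matching keywords and indexes a bundle table (alternative decomposition; same behaviour).

-- ===== PORT A =====
def suggest_product_details (partial_name : String) : List (String × String) :=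
  let suggestions : PySem.Dict String String := PySem.Dict.empty
  let name_lower := PySem.Str.lower partial_name
  let suggestions :=
    if (["phone", "smartphone", "mobile"].any fun word => PySem.Str.isIn word name_lower) then
      ((suggestions.insert "category" "Electronics").insert "warranty" "12 months").insert
        "example_description" "Latest smartphone with advanced features"
    else if (["laptop", "computer", "pc"].any fun word => PySem.Str.isIn word name_lower) then
      ((suggestions.insert "category" "Computing").insert "warranty" "24 months").insert
        "example_description" "High-performance laptop for work and entertainment"
    else if (["headphone", "earphone", "speaker"].any fun word => PySem.Str.isIn word name_lower) then
      ((suggestions.insert "category" "Audio").insert "warranty" "6 months").insert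
        "example_description" "Premium audio device with superior sound quality"
    else if (["cable", "charger", "adapter"].any fun word => PySem.Str.isIn word name_lower) then
      ((suggestions.insert "category" "Accessories").insert "warranty" "3 months").insert
        "example_description" "Quality accessory for your devices"
    else
      ((suggestions.insert "category" "Electronics").insert "warranty" "6 months").insert
        "example_description" "Quality product with reliable performance"
  let suggestions :=
    if PySem.Str.isIn "iphone" name_lower || PySem.Str.isIn "macbook" name_lower
        || PySem.Str.isIn "ipad" name_lower then
      suggestions.insert "brand" "Apple"
    else if PySem.Str.isIn "samsung" name_lower || PySem.Str.isIn "galaxy" name_lower then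
      suggestions.insert "brand" "Samsung"
    else if PySem.Str.isIn "dell" name_lower then suggestions.insert "brand" "Dell"
    else if PySem.Str.isIn "hp" name_lower then suggestions.insert "brand" "HP"
    else if PySem.Str.isIn "sony" name_lower then suggestions.insert "brand" "Sony"
    else suggestions.insert "brand" "Generic"
  suggestions.items

-- ===== PORT B =====
-- Python's min((p for k, p in table if k in nl), default=d): the minimum priority
-- among matching keywords, d if none match (order-insensitive, so a structural
-- recursion folding `min` from the right computes the same value).
def pvMinMatch (nl : String) : List (String × Nat) → Nat → Nat
  | [], d => d
  | (k, i) :: ps, d =>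
      let r := pvMinMatch nl ps d
      if PySem.Str.isIn k nl then min i r else r

def suggest_product_details_alt (partial_name : String) : List (String × String) :=
  let name_lower := PySem.Str.lower partial_name
  let category_priority : List (String × Nat) :=
    [("phone", 0), ("smartphone", 0), ("mobile", 0),
     ("laptop", 1), ("computer", 1), ("pc", 1),
     ("headphone", 2), ("earphone", 2), ("speaker", 2),
     ("cable", 3), ("charger", 3), ("adapter", 3)]
  let category_bundles : List (String × String × String) :=
    [("Electronics", "12 months", "Latest smartphone with advanced features"),
     ("Computing", "24 months", "High-performance laptop for work and entertainment"),
     ("Audio", "6 months", "Premium audio device with superior sound quality"),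
     ("Accessories", "3 months", "Quality accessory for your devices"),
     ("Electronics", "6 months", "Quality product with reliable performance")]
  let cat_idx := pvMinMatch name_lower category_priority (category_bundles.length - 1)
  -- Python list indexing category_bundles[cat_idx]: cat_idx ≤ 4 always, so getD is exact
  let bundle := category_bundles.getD cat_idx ("", "", "")
  let brand_priority : List (String × Nat) :=
    [("iphone", 0), ("macbook", 0), ("ipad", 0),
     ("samsung", 1), ("galaxy", 1),
     ("dell", 2), ("hp", 3), ("sony", 4)]
  let brands : List String := ["Apple", "Samsung", "Dell", "HP", "Sony", "Generic"]
  let brand := brands.getD (pvMinMatch name_lower brand_priority (brands.length - 1)) ""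
  [("category", bundle.1), ("warranty", bundle.2.1),
   ("example_description", bundle.2.2), ("brand", brand)]

-- ===== PRECONDITION & SPEC =====
def Spec_suggest_product_details (partial_name : String) (out : List (String × String)) : Prop := out = suggest_product_details_alt partial_name
instance (partial_name : String) (out : List (String × String)) : Decidable (Spec_suggest_product_details partial_name out) := by unfold Spec_suggest_product_details; infer_instance

-- ===== CLAIM (what is proved, stated in full; the proofs are below) =====
def Claim_equal_suggest_product_details : Prop := ∀ (partial_name : String), Dom_suggest_product_details partial_name → Spec_suggest_product_details partial_name (suggest_product_details partial_name)

-- ===== LEMMAS AND PROOFS =====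

theorem pvMinMatch_append (nl : String) (ps qs : List (String × Nat)) (d : Nat) :
    pvMinMatch nl (ps ++ qs) d = pvMinMatch nl ps (pvMinMatch nl qs d) := by
  induction ps with
  | nil => rfl
  | cons p ps ih => cases p with
    | mk k i => simp [pvMinMatch, ih]

theorem pvMinMatch_group3 (nl a b c : String) (i d : Nat) :
    pvMinMatch nl [(a, i), (b, i), (c, i)] d =
      if PySem.Str.isIn a nl || (PySem.Str.isIn b nl || PySem.Str.isIn c nl) then min i d else d := by
  simp only [pvMinMatch]
  split_ifs <;> simp_all

theorem pvMinMatch_group2 (nl a b : String) (i d : Nat) :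
    pvMinMatch nl [(a, i), (b, i)] d =
      if PySem.Str.isIn a nl || PySem.Str.isIn b nl then min i d else d := by
  simp only [pvMinMatch]
  split_ifs <;> simp_all

theorem pvMinMatch_group1 (nl a : String) (i d : Nat) :
    pvMinMatch nl [(a, i)] d = if PySem.Str.isIn a nl then min i d else d := by
  simp [pvMinMatch]

theorem pvCatIdx_eq (s : String) :
    pvMinMatch s
      [("phone", 0), ("smartphone", 0), ("mobile", 0),
       ("laptop", 1), ("computer", 1), ("pc", 1),
       ("headphone", 2), ("earphone", 2), ("speaker", 2),
       ("cable", 3), ("charger", 3), ("adapter", 3)] 4 =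
      (if PySem.Str.isIn "phone" s || (PySem.Str.isIn "smartphone" s || PySem.Str.isIn "mobile" s) then 0
       else if PySem.Str.isIn "laptop" s || (PySem.Str.isIn "computer" s || PySem.Str.isIn "pc" s) then 1
       else if PySem.Str.isIn "headphone" s || (PySem.Str.isIn "earphone" s || PySem.Str.isIn "speaker" s) then 2
       else if PySem.Str.isIn "cable" s || (PySem.Str.isIn "charger" s || PySem.Str.isIn "adapter" s) then 3
       else 4) := by
  rw [show ([("phone", 0), ("smartphone", 0), ("mobile", 0),
       ("laptop", 1), ("computer", 1), ("pc", 1),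
       ("headphone", 2), ("earphone", 2), ("speaker", 2),
       ("cable", 3), ("charger", 3), ("adapter", 3)] : List (String × Nat)) =
      [("phone", 0), ("smartphone", 0), ("mobile", 0)] ++
        ([("laptop", 1), ("computer", 1), ("pc", 1)] ++
          ([("headphone", 2), ("earphone", 2), ("speaker", 2)] ++
            [("cable", 3), ("charger", 3), ("adapter", 3)])) from rfl]
  rw [pvMinMatch_append, pvMinMatch_append, pvMinMatch_append,
      pvMinMatch_group3, pvMinMatch_group3, pvMinMatch_group3, pvMinMatch_group3]
  split_ifs <;> rfl

theorem pvBrandIdx_eq (s : String) :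
    pvMinMatch s
      [("iphone", 0), ("macbook", 0), ("ipad", 0),
       ("samsung", 1), ("galaxy", 1),
       ("dell", 2), ("hp", 3), ("sony", 4)] 5 =
      (if PySem.Str.isIn "iphone" s || (PySem.Str.isIn "macbook" s || PySem.Str.isIn "ipad" s) then 0
       else if PySem.Str.isIn "samsung" s || PySem.Str.isIn "galaxy" s then 1
       else if PySem.Str.isIn "dell" s then 2
       else if PySem.Str.isIn "hp" s then 3
       else if PySem.Str.isIn "sony" s then 4
       else 5) := by
  rw [show ([("iphone", 0), ("macbook", 0), ("ipad", 0),
       ("samsung", 1), ("galaxy", 1),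
       ("dell", 2), ("hp", 3), ("sony", 4)] : List (String × Nat)) =
      [("iphone", 0), ("macbook", 0), ("ipad", 0)] ++
        ([("samsung", 1), ("galaxy", 1)] ++
          ([("dell", 2)] ++ ([("hp", 3)] ++ [("sony", 4)]))) from rfl]
  rw [pvMinMatch_append, pvMinMatch_append, pvMinMatch_append, pvMinMatch_append,
      pvMinMatch_group3, pvMinMatch_group2, pvMinMatch_group1, pvMinMatch_group1,
      pvMinMatch_group1]
  split_ifs <;> rfl

-- ===== VERDICT (by name: the statement is the Claim_ definition above) =====
set_option maxHeartbeats 1000000 in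
theorem suggest_product_details_spec : Claim_equal_suggest_product_details := by
  intro partial_name _
  unfold Spec_suggest_product_details suggest_product_details suggest_product_details_alt
  generalize PySem.Str.lower partial_name = s
  simp only [List.any_cons, List.any_nil, Bool.or_false, Bool.or_assoc, List.length_cons,
    List.length_nil, Nat.zero_add, Nat.add_sub_cancel]
  rw [pvCatIdx_eq s, pvBrandIdx_eq s]
  split_ifs <;> rfl
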